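-- pv_equiv track=rewrite | github.com/nullco/pana | pana/tui/autocomplete.py | _find_unclosed_quote_start
-- ===== SOURCE A (Python) =====
-- def _find_unclosed_quote_start(text: str) -> int | None:
--     in_quotes = False
--     quote_start = -1
--     for i, ch in enumerate(text):
--         if ch == '"':
--             in_quotes = not in_quotes
--             if in_quotes:
--                 quote_start = i
--     return quote_start if in_quotes else None
-- ===== SOURCE B (Python) =====
-- def _find_unclosed_quote_start(text: str) -> int | None:
--     if text.count('"') % 2 == 1:
--         return text.rfind('"')
--     return None
-- ===== Notes on version B (the rewrite author's own statement) =====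
-- stated objective: simpler
-- what changed: Replaces the stateful toggle-and-record scan with a closed-form decomposition: the quote count's parity decides whether a quote is unclosed, and if so the unclosed opener is the last quote (rfind).
import Mathlib
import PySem

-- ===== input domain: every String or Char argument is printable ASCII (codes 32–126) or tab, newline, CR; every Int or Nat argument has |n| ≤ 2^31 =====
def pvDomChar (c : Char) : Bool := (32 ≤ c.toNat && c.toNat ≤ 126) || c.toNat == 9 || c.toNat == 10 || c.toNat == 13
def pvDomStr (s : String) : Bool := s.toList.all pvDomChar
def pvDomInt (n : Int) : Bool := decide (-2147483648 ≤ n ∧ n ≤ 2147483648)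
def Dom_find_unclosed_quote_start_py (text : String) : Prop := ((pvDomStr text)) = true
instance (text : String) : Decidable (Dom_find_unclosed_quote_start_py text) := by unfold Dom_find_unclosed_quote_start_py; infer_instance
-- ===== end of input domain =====

-- B replaces A's stateful toggle-and-record scan by a parity test on the quote count
-- plus a last-occurrence lookup (rfind); same cost, simpler decomposition.

-- ===== PORT A =====
def find_unclosed_quote_start_py (text : String) : Option Int :=
  let r := (PySem.List.enumerate text.toList 0).foldl
    (fun (s : Bool × Int) (p : Int × Char) =>
      if p.2 == '"' then
        let in_quotes := !s.1
        let quote_start := if in_quotes then p.1 else s.2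
        (in_quotes, quote_start)
      else s) (false, -1)
  if r.1 then some r.2 else none

-- ===== PORT B =====
def find_unclosed_quote_start_py_alt (text : String) : Option Int :=
  if PySem.Str.count text "\"" % 2 == 1 then some (PySem.Str.rfind text "\"") else none

-- ===== PRECONDITION & SPEC =====
def Spec_find_unclosed_quote_start_py (text : String) (out : Option Int) : Prop := out = find_unclosed_quote_start_py_alt text
instance (text : String) (out : Option Int) : Decidable (Spec_find_unclosed_quote_start_py text out) := by unfold Spec_find_unclosed_quote_start_py; infer_instance

-- ===== CLAIM (what is proved, stated in full; the proofs are below) =====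
def Claim_equal_find_unclosed_quote_start_py : Prop := ∀ (text : String), Dom_find_unclosed_quote_start_py text → Spec_find_unclosed_quote_start_py text (find_unclosed_quote_start_py text)

-- ===== LEMMAS AND PROOFS =====

-- ['"'] is a prefix of l exactly when l's first element is '"'
theorem quote_isPrefixOf (l : List Char) :
    (['"'].isPrefixOf l) = (l[0]? == some '"') := by
  cases l with
  | nil => rfl
  | cons h t => simp [List.isPrefixOf, eq_comm]

theorem rgo_zero (s : List Char) :
    PySem.Chars.rfind.go s ['"'] 0 = if s[0]? == some '"' then 0 else -1 := by
  rw [PySem.Chars.rfind.go, quote_isPrefixOf]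

theorem rgo_succ (s : List Char) (j : Nat) :
    PySem.Chars.rfind.go s ['"'] (j + 1)
      = if s[j + 1]? == some '"' then ((j : Int) + 1) else PySem.Chars.rfind.go s ['"'] j := by
  rw [PySem.Chars.rfind.go, quote_isPrefixOf]
  rw [List.getElem?_drop]
  push_cast
  ring_nf

-- count.go on a single-character needle counts the character occurrences
theorem cgo_single (l : List Char) : ∀ (fuel acc : Nat), l.length ≤ fuel →
    PySem.Chars.count.go ['"'] fuel l acc = acc + l.count '"' := by
  induction l with
  | nil => intro fuel acc _; cases fuel <;> simp [PySem.Chars.count.go]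
  | cons h t ih =>
    intro fuel acc hf
    cases fuel with
    | zero => simp at hf
    | succ f =>
      rw [PySem.Chars.count.go]
      simp only [quote_isPrefixOf]
      by_cases hq : h = '"'
      · subst hq
        simp only [List.getElem?_cons_zero, beq_self_eq_true, if_pos]
        have h1 : List.drop (['"'] : List Char).length ('"' :: t) = t := by simp
        rw [h1, ih f (acc + 1) (by simpa using hf)]
        simp [List.count_cons]
        omega
      · have hne : ((h :: t)[0]? == some '"') = false := by
          simp [hq]
        rw [hne]
        simp only [Bool.false_eq_true, if_false]
        rw [ih f acc (by simpa using hf)]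
        simp [hq]

theorem chars_count_quote (cs : List Char) :
    PySem.Chars.count cs ['"'] = cs.count '"' := by
  rw [PySem.Chars.count]
  simp [cgo_single cs cs.length 0 le_rfl]

theorem rgo_append (cs : List Char) (c : Char) (hc : c ≠ '"') :
    ∀ n, n ≤ cs.length →
      PySem.Chars.rfind.go (cs ++ [c]) ['"'] n = PySem.Chars.rfind.go cs ['"'] n := by
  intro n
  induction n with
  | zero =>
    intro _
    rw [rgo_zero, rgo_zero]
    rcases cs with _ | ⟨h, t⟩
    · simp [hc]
    · simp
  | succ j ih =>
    intro hj
    rw [rgo_succ, rgo_succ, ih (by omega)]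
    rcases lt_or_eq_of_le hj with h | h
    · rw [List.getElem?_append_left h]
    · have h1 : (cs ++ [c])[j + 1]? = some c := by
        rw [h]
        simp
      have h2 : cs[j + 1]? = none := by
        rw [List.getElem?_eq_none_iff]; omega
      rw [h1, h2]
      simp [hc]

theorem rgo_hit (s : List Char) (n : Nat) (h : s[n]? = some '"') :
    PySem.Chars.rfind.go s ['"'] n = n := by
  cases n with
  | zero => rw [rgo_zero, h]; simp
  | succ j => rw [rgo_succ, h]; simp

theorem rfind_snoc_other (cs : List Char) (c : Char) (hc : c ≠ '"') :
    PySem.Chars.rfind (cs ++ [c]) ['"'] = PySem.Chars.rfind cs ['"'] := by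
  rw [PySem.Chars.rfind, PySem.Chars.rfind]
  have hlen : (cs ++ [c]).length = cs.length + 1 := by simp
  rw [hlen, rgo_succ]
  have : (cs ++ [c])[cs.length + 1]? = none := by
    rw [List.getElem?_eq_none_iff]; simp
  rw [this]
  simp only [show (none == some '"') = false from rfl, Bool.false_eq_true, if_false]
  exact rgo_append cs c hc cs.length le_rfl

theorem rfind_snoc_quote (cs : List Char) :
    PySem.Chars.rfind (cs ++ ['"']) ['"'] = (cs.length : Int) := by
  rw [PySem.Chars.rfind]
  have hlen : (cs ++ ['"']).length = cs.length + 1 := by simp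
  rw [hlen, rgo_succ]
  have h0 : (cs ++ ['"'])[cs.length + 1]? = none := by
    rw [List.getElem?_eq_none_iff]; simp
  rw [h0]
  simp only [show (none == some '"') = false from rfl, Bool.false_eq_true, if_false]
  exact rgo_hit _ _ (by simp)

-- the invariant of A's loop: the Bool is the parity of the quote count,
-- and when it is set the recorded index is the last quote's index
theorem loopA_spec (cs : List Char) :
    ((PySem.List.enumerate cs 0).foldl
      (fun (s : Bool × Int) (p : Int × Char) =>
        if p.2 == '"' then
          let in_quotes := !s.1
          let quote_start := if in_quotes then p.1 else s.2
          (in_quotes, quote_start)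
        else s) (false, -1)).1 = (cs.count '"' % 2 == 1)
    ∧ (((PySem.List.enumerate cs 0).foldl
      (fun (s : Bool × Int) (p : Int × Char) =>
        if p.2 == '"' then
          let in_quotes := !s.1
          let quote_start := if in_quotes then p.1 else s.2
          (in_quotes, quote_start)
        else s) (false, -1)).1 = true →
      ((PySem.List.enumerate cs 0).foldl
      (fun (s : Bool × Int) (p : Int × Char) =>
        if p.2 == '"' then
          let in_quotes := !s.1
          let quote_start := if in_quotes then p.1 else s.2
          (in_quotes, quote_start)
        else s) (false, -1)).2 = PySem.Chars.rfind cs ['"']) := by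
  induction cs using List.reverseRecOn with
  | nil => simp [PySem.List.enumerate]
  | append_singleton cs c ih =>
    obtain ⟨ih1, ih2⟩ := ih
    rw [PySem.List.enumerate_append] at *
    have hone : PySem.List.enumerate [c] ((0 : Int) + cs.length)
        = [((cs.length : Int), c)] := by
      rw [PySem.List.enumerate_cons, PySem.List.enumerate_nil]
      norm_num
    rw [hone, List.foldl_append]
    set r := (PySem.List.enumerate cs 0).foldl
      (fun (s : Bool × Int) (p : Int × Char) =>
        if p.2 == '"' then
          let in_quotes := !s.1
          let quote_start := if in_quotes then p.1 else s.2
          (in_quotes, quote_start)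
        else s) (false, -1) with hr
    by_cases hc : c = '"'
    · subst hc
      simp only [List.foldl_cons, List.foldl_nil, beq_self_eq_true, if_pos]
      constructor
      · rw [List.count_append]
        simp only [List.count_singleton, beq_self_eq_true, if_pos]
        cases hb : r.1
        · rw [hb] at ih1
          have : cs.count '"' % 2 = 0 := by
            by_contra h
            have : cs.count '"' % 2 = 1 := by omega
            simp [this] at ih1
          simp [this]
          omega
        
        · rw [hb] at ih1
          have : cs.count '"' % 2 = 1 := by
            by_contra h
            have h0 : cs.count '"' % 2 = 0 := by omega
            simp [h0] at ih1
          have h2 : (cs.count '"' + 1) % 2 = 0 := by omega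
          simp [h2]
      · intro hset
        cases hb : r.1
        · rw [hb] at *
          simp only [Bool.not_false, if_pos]
          rw [rfind_snoc_quote]
        · rw [hb] at hset
          simp at hset
    · have hcb : (c == '"') = false := by simp [hc]
      simp only [List.foldl_cons, List.foldl_nil, hcb, Bool.false_eq_true, if_false]
      constructor
      · rw [List.count_append]
        simp only [List.count_singleton, hcb, Bool.false_eq_true, if_false]
        simpa using ih1
      · intro hset
        rw [rfind_snoc_other cs c hc]
        exact ih2 hset

-- ===== VERDICT (by name: the statement is the Claim_ definition above) =====
theorem find_unclosed_quote_start_py_spec : Claim_equal_find_unclosed_quote_start_py := by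
  intro text _
  unfold Spec_find_unclosed_quote_start_py
  unfold find_unclosed_quote_start_py find_unclosed_quote_start_py_alt
  have hq : ("\"" : String).toList = ['"'] := rfl
  rw [PySem.Str.count_eq, PySem.Str.rfind_eq, hq, chars_count_quote]
  obtain ⟨h1, h2⟩ := loopA_spec text.toList
  simp only [] at *
  rw [h1]
  by_cases hp : text.toList.count '"' % 2 = 1
  · simp only [hp, beq_self_eq_true, if_pos]
    rw [h2 (by rw [h1]; simp [hp])]
  · have : (text.toList.count '"' % 2 == 1) = false := by simp [hp]
    rw [this]
    simp
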